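-- pv_equiv track=rewrite | github.com/jabadia/advent-of-code-2018 | d11/d11p1.py | solve
-- ===== SOURCE A (Python) =====
-- def power_level(x, y, serial):
--     rack_id = x + 10
--     power_level = ((rack_id * y) + serial) * rack_id
--     # hundreds = int(str(power_level)[-3])
--     hundreds = (power_level // 100) % 10
--     return hundreds - 5
--
-- DIM = 300
--
-- def square_level(grid, x, y):
--     return (
--             grid[x * DIM + y] + grid[(x + 1) * DIM + y] + grid[(x + 2) * DIM + y] +
--             grid[x * DIM + y + 1] + grid[(x + 1) * DIM + y + 1] + grid[(x + 2) * DIM + y + 1] +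
--             grid[x * DIM + y + 2] + grid[(x + 1) * DIM + y + 2] + grid[(x + 2) * DIM + y + 2]
--     )
--
-- def solve(input):
--     serial = input
--     grid = [-999] * DIM * DIM
--     for x in range(0, DIM):
--         for y in range(0, DIM):
--             grid[x * DIM + y] = power_level(x + 1, y + 1, serial)
--
--     max_level = -999
--     max_cell = None
--     for x in range(0, DIM - 3):
--         for y in range(0, DIM - 3):
--             level = square_level(grid, x, y)
--             if level > max_level:
--                 max_cell = (x + 1, y + 1)
--                 max_level = level
--     return max_cell
-- ===== SOURCE B (Python) =====
-- DIM = 300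
--
-- def power_level(x, y, serial):
--     rack_id = x + 10
--     power_level = ((rack_id * y) + serial) * rack_id
--     hundreds = (power_level // 100) % 10
--     return hundreds - 5
--
-- def solve(input):
--     serial = input
--     # grid as a list of rows (nested lists instead of A's flat mutated array)
--     grid = [[power_level(x + 1, y + 1, serial) for y in range(DIM)] for x in range(DIM)]
--     # precompute the horizontal sum of each three-cell window of every row,
--     # so each square is the sum of three precomputed values instead of nine cells
--     rowsum = [[row[y] + row[y + 1] + row[y + 2] for y in range(DIM - 2)] for row in grid]
--     max_level = -999
--     max_cell = None
--     for x in range(DIM - 3):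
--         for y in range(DIM - 3):
--             level = rowsum[x][y] + rowsum[x + 1][y] + rowsum[x + 2][y]
--             if level > max_level:
--                 max_cell = (x + 1, y + 1)
--                 max_level = level
--     return max_cell
-- ===== Notes on version B (the rewrite author's own statement) =====
-- stated objective: faster
-- what changed: B builds the power grid as nested-list comprehensions (instead of mutating a flat array) and precomputes per-row sums of every horizontal three-cell window, so each square is the sum of three precomputed values instead of nine grid lookups; same scan order and strict-greater tie-break.
import Mathlib
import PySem

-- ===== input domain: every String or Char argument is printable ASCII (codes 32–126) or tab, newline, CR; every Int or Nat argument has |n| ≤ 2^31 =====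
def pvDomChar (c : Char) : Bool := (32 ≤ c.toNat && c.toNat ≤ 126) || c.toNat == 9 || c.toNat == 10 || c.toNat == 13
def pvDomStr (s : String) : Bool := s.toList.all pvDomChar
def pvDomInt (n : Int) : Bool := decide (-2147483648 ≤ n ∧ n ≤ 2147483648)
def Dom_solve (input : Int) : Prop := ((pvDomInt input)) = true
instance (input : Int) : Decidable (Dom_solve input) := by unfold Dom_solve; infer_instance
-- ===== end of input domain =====

-- B precomputes per-row sums of every horizontal three-cell window so each square costs three lookups instead of nine (constant-factor speedup, measured).


-- ===== PORT A =====
-- Python list write/read on an Array; exact for the indices these programs use (always 0 ≤ i;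
-- reads are always in range, where Array.getD and Python agree)
def pvASet (arr : Array Int) (i : Int) (v : Int) : Array Int :=
  if 0 ≤ i then arr.setIfInBounds i.toNat v else arr

def pvAGet {α : Type} (arr : Array α) (i : Int) (d : α) : α :=
  if 0 ≤ i then arr.getD i.toNat d else d

def pvPowerLevel (x y serial : Int) : Int :=
  let rackId := x + 10
  let pl := (rackId * y + serial) * rackId
  let hundreds := PySem.Int.mod (PySem.Int.floordiv pl 100) 10
  hundreds - 5

def pvSquareLevel (grid : Array Int) (x y : Int) : Int :=
  pvAGet grid (x * 300 + y) 0 + pvAGet grid ((x + 1) * 300 + y) 0 +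
    pvAGet grid ((x + 2) * 300 + y) 0 +
  pvAGet grid (x * 300 + y + 1) 0 + pvAGet grid ((x + 1) * 300 + y + 1) 0 +
    pvAGet grid ((x + 2) * 300 + y + 1) 0 +
  pvAGet grid (x * 300 + y + 2) 0 + pvAGet grid ((x + 1) * 300 + y + 2) 0 +
    pvAGet grid ((x + 2) * 300 + y + 2) 0

def pvGridA (serial : Int) : Array Int :=
  (PySem.List.pyRange 0 300 1).foldl (fun g x =>
    (PySem.List.pyRange 0 300 1).foldl (fun g y =>
      pvASet g (x * 300 + y) (pvPowerLevel (x + 1) (y + 1) serial)) g)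
    (PySem.List.pyRepeat [(-999 : Int)] (300 * 300)).toArray

def solve (input : Int) : Int × Int :=
  let serial := input
  let grid := pvGridA serial
  let st := (PySem.List.pyRange 0 (300 - 3) 1).foldl (fun st x =>
      (PySem.List.pyRange 0 (300 - 3) 1).foldl (fun st y =>
        let level := pvSquareLevel grid x y
        if st.1 < level then (level, some (x + 1, y + 1)) else st) st)
    ((-999 : Int), (none : Option (Int × Int)))
  st.2.getD (0, 0)

-- ===== PORT B =====
def pvGridB (serial : Int) : Array (Array Int) :=
  ((PySem.List.pyRange 0 300 1).map (fun x =>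
    ((PySem.List.pyRange 0 300 1).map (fun y => pvPowerLevel (x + 1) (y + 1) serial)).toArray)).toArray

def pvRowSum (grid : Array (Array Int)) : Array (Array Int) :=
  grid.map (fun row =>
    ((PySem.List.pyRange 0 (300 - 2) 1).map (fun y =>
      pvAGet row y 0 + pvAGet row (y + 1) 0 + pvAGet row (y + 2) 0)).toArray)

def solve_alt (input : Int) : Int × Int :=
  let serial := input
  let rowsum := pvRowSum (pvGridB serial)
  let st := (PySem.List.pyRange 0 (300 - 3) 1).foldl (fun st x =>
      (PySem.List.pyRange 0 (300 - 3) 1).foldl (fun st y =>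
        let level := pvAGet (pvAGet rowsum x #[]) y 0 +
                     pvAGet (pvAGet rowsum (x + 1) #[]) y 0 +
                     pvAGet (pvAGet rowsum (x + 2) #[]) y 0
        if st.1 < level then (level, some (x + 1, y + 1)) else st) st)
    ((-999 : Int), (none : Option (Int × Int)))
  st.2.getD (0, 0)

-- ===== PRECONDITION & SPEC =====
def Spec_solve (input : Int) (out : Int × Int) : Prop := out = solve_alt input
instance (input : Int) (out : Int × Int) : Decidable (Spec_solve input out) := by unfold Spec_solve; infer_instance

-- ===== CLAIM (what is proved, stated in full; the proofs are below) =====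
def Claim_equal_solve : Prop := ∀ (input : Int), Dom_solve input → Spec_solve input (solve input)

-- ===== LEMMAS AND PROOFS =====

theorem pvASet_toList (arr : Array Int) (i : Int) (v : Int) (h : 0 ≤ i) :
    (pvASet arr i v).toList = PySem.List.pySetD arr.toList i v := by
  rw [PySem.List.pySetD_of_nonneg _ _ h]
  simp [pvASet, h]

theorem pvAGet_toList {α : Type} (arr : Array α) (i : Int) (d : α) (h : 0 ≤ i) :
    pvAGet arr i d = PySem.List.pyGetD arr.toList i d := by
  have hlen : arr.toList.length = arr.size := Array.length_toList
  simp only [pvAGet, PySem.List.pyGetD, PySem.List.pyGet?, PySem.List.pyIdx?, Array.getD, hlen,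
    if_pos h]
  split_ifs with h1 h2 h2
  · rw [Option.bind_some, List.getElem?_eq_getElem (by omega), Option.getD_some]
    exact (Array.getElem_toList h1).symm
  · omega
  · omega
  · simp

theorem pvAGet_toArray_map_pyRange {α : Type} (f : Int → α) (n i : Int) (d : α)
    (h0 : 0 ≤ i) (h : i < n) :
    pvAGet ((PySem.List.pyRange 0 n 1).map f).toArray i d = f i := by
  rw [pvAGet_toList _ _ _ h0, List.toList_toArray]
  exact PySem.List.pyGetD_map_pyRange_of_nonneg f n i d h0 h

-- a fold over Arrays projects to the corresponding fold over toList
theorem pv_foldl_toList (l : List Int) (F : Array Int → Int → Array Int) (G : List Int → Int → List Int)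
    (h : ∀ (a : Array Int) (i : Int), i ∈ l → (F a i).toList = G a.toList i) :
    ∀ arr : Array Int, (l.foldl F arr).toList = l.foldl G arr.toList := by
  induction l with
  | nil => intro arr; simp
  | cons i t ih =>
    intro arr
    simp only [List.foldl_cons]
    have harr : (F arr i).toList = G arr.toList i := h arr i (by simp)
    rw [ih (fun a j hm => h a j (by simp [hm])) (F arr i), harr]

-- a loop of sets filling consecutive cells [b, b+n) of a list
theorem pv_fill (f : Int → Int) (n : Nat) : ∀ (g : List Int) (b : Nat), b + n ≤ g.length →
    (PySem.List.pyRange 0 (n : Int) 1).foldl (fun g y => PySem.List.pySetD g ((b : Int) + y) (f y)) g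
    = g.take b ++ (List.range n).map (fun k => f (Int.ofNat k)) ++ g.drop (b + n) := by
  induction n with
  | zero =>
    intro g b h
    simp
  | succ n ih =>
    intro g b h
    have hc : ((n + 1 : Nat) : Int) = (n : Int) + 1 := by push_cast; ring
    have hr : PySem.List.pyRange 0 ((n : Int) + 1) 1 = PySem.List.pyRange 0 (n : Int) 1 ++ [(n : Int)] :=
      PySem.List.pyRange_one_succ_right (by omega)
    rw [hc, hr, List.foldl_append, ih g b (by omega)]
    simp only [List.foldl_cons, List.foldl_nil]
    rw [PySem.List.pySetD_of_nonneg _ _ (by omega)]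
    have ht : ((b : Int) + (n : Int)).toNat = b + n := by omega
    rw [ht]
    have hlen1 : (g.take b).length = b := by simp; omega
    have hdrop := List.drop_eq_getElem_cons (l := g) (i := b + n) (by omega)
    rw [List.range_succ, List.map_append, hdrop]
    rw [List.set_append, List.set_append]
    simp [hlen1]
    rw [hdrop, List.set_cons_zero, Nat.add_assoc]

-- length of a row-major flattening with rows of length 300
theorem pv_flatLen (rows : Nat → List Int) (h : ∀ i, (rows i).length = 300) :
    ∀ n, ((List.range n).flatMap rows).length = n * 300 := by
  intro n
  induction n with
  | zero => simp
  | succ m ihm => rw [List.range_succ, List.flatMap_append]; simp [ihm, h]; ring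

-- the whole double loop of A fills the flat grid row by row
theorem pv_fillAll (F : Int → Int → Int) : ∀ (m : Nat), m ≤ 300 →
    (PySem.List.pyRange 0 (m : Int) 1).foldl
      (fun g x => (PySem.List.pyRange 0 300 1).foldl
        (fun g y => PySem.List.pySetD g (x * 300 + y) (F x y)) g)
      (List.replicate 90000 (-999 : Int))
    = (List.range m).flatMap (fun x => (List.range 300).map (fun k => F (Int.ofNat x) (Int.ofNat k)))
      ++ List.replicate ((300 - m) * 300) (-999 : Int) := by
  intro m
  induction m with
  | zero =>
    intro _
    rw [show ((0 : Nat) : Int) = (0 : Int) by norm_num, PySem.List.pyRange_one_eq_nil (a := 0) (b := 0) le_rfl]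
    simp only [List.foldl_nil, List.range_zero, List.flatMap_nil, List.nil_append]
  | succ m ih =>
    intro hm
    have hc : ((m + 1 : Nat) : Int) = (m : Int) + 1 := by push_cast; ring
    have hr : PySem.List.pyRange 0 ((m : Int) + 1) 1 = PySem.List.pyRange 0 (m : Int) 1 ++ [(m : Int)] :=
      PySem.List.pyRange_one_succ_right (by omega)
    rw [hc, hr, List.foldl_append, ih (by omega)]
    simp only [List.foldl_cons, List.foldl_nil]
    set rows : Nat → List Int := fun x => (List.range 300).map (fun k => F (Int.ofNat x) (Int.ofNat k)) with hrows
    have hrl : ∀ i, (rows i).length = 300 := by intro i; simp [hrows]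
    set P := (List.range m).flatMap rows with hP
    have hPlen : P.length = m * 300 := pv_flatLen rows hrl m
    set R := List.replicate ((300 - m) * 300) (-999 : Int) with hR
    have hlen : m * 300 + 300 ≤ (P ++ R).length := by
      rw [List.length_append, hPlen, hR, List.length_replicate]; omega
    have hfill := pv_fill (F (Int.ofNat m)) 300 (P ++ R) (m * 300) hlen
    have h300 : ((300 : Nat) : Int) = (300 : Int) := by norm_num
    rw [h300] at hfill
    have hfun : (fun (g : List Int) (y : Int) => PySem.List.pySetD g ((m : Int) * 300 + y) (F (m : Int) y))
        = (fun g y => PySem.List.pySetD g (((m * 300 : Nat) : Int) + y) (F (Int.ofNat m) y)) := by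
      funext g y; norm_num
    rw [hfun, hfill]
    rw [List.take_left' hPlen]
    have hdrop : (P ++ R).drop (m * 300 + 300) = R.drop 300 := by
      rw [← hPlen]
      exact List.drop_length_add_append 300
    rw [hdrop, hR, List.drop_replicate]
    rw [show (300 - m) * 300 - 300 = (300 - (m + 1)) * 300 by omega]
    rw [show List.range (m + 1) = List.range m ++ [m] from List.range_succ, List.flatMap_append]
    simp [hrows, List.append_assoc]
    rfl

set_option maxRecDepth 4096 in
theorem pv_gridA_toList (serial : Int) :
    (pvGridA serial).toList
    = (List.range 300).flatMap (fun x =>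
        (List.range 300).map (fun k => pvPowerLevel (Int.ofNat x + 1) (Int.ofNat k + 1) serial)) := by
  unfold pvGridA
  have hcomm : ∀ (a : Array Int) (x : Int), x ∈ PySem.List.pyRange 0 300 1 →
      ((PySem.List.pyRange 0 300 1).foldl
        (fun g y => pvASet g (x * 300 + y) (pvPowerLevel (x + 1) (y + 1) serial)) a).toList
      = (PySem.List.pyRange 0 300 1).foldl
        (fun g y => PySem.List.pySetD g (x * 300 + y) (pvPowerLevel (x + 1) (y + 1) serial)) a.toList := by
    intro a x hx
    have hxb := (PySem.List.mem_pyRange_one).mp hx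
    exact pv_foldl_toList _ _ _
      (fun a' y hy => by
        have hyb := (PySem.List.mem_pyRange_one).mp hy
        exact pvASet_toList a' (x * 300 + y) _ (by nlinarith [hxb.1, hyb.1])) a
  rw [pv_foldl_toList _ _
        (fun g x => (PySem.List.pyRange 0 300 1).foldl
          (fun g y => PySem.List.pySetD g (x * 300 + y) (pvPowerLevel (x + 1) (y + 1) serial)) g)
        hcomm, List.toList_toArray]
  have h := pv_fillAll (fun x y => pvPowerLevel (x + 1) (y + 1) serial) 300 le_rfl
  rw [show ((300 : Nat) : Int) = (300 : Int) by norm_num] at h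
  rw [show (300 - 300) * 300 = 0 by norm_num] at h
  rw [List.replicate_zero, List.append_nil] at h
  rw [PySem.List.pyRepeat_singleton, show ((300 * 300 : Int)).toNat = 90000 by simp]
  exact h

-- reading one cell of a row-major flattening
theorem pv_getFlat (rows : Nat → List Int) (h : ∀ i, (rows i).length = 300) :
    ∀ (n x y : Nat), x < n → y < 300 →
    ((List.range n).flatMap rows).getD (x * 300 + y) 0 = (rows x).getD y 0 := by
  intro n
  induction n with
  | zero => intro x y hx; omega
  | succ n ih =>
    intro x y hx hy
    have hlen := pv_flatLen rows h n
    rw [List.range_succ, List.flatMap_append]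
    by_cases hxn : x < n
    · rw [List.getD_append _ _ _ _ (by rw [hlen]; nlinarith)]
      exact ih x y hxn hy
    · have hx' : x = n := by omega
      subst hx'
      rw [List.getD_append_right _ _ _ _ (by omega)]
      rw [hlen]
      simp

theorem pv_gridA_get (serial : Int) (x y : Int) (hx0 : 0 ≤ x) (hx : x < 300)
    (hy0 : 0 ≤ y) (hy : y < 300) :
    pvAGet (pvGridA serial) (x * 300 + y) 0 = pvPowerLevel (x + 1) (y + 1) serial := by
  rw [pvAGet_toList _ _ _ (by nlinarith), pv_gridA_toList]
  obtain ⟨a, rfl⟩ : ∃ a : Nat, x = (a : Int) := ⟨x.toNat, by omega⟩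
  obtain ⟨b, rfl⟩ : ∃ b : Nat, y = (b : Int) := ⟨y.toNat, by omega⟩
  have hcast : ((a : Int) * 300 + (b : Int)) = ((a * 300 + b : Nat) : Int) := by push_cast; ring
  rw [hcast, PySem.List.pyGetD_natCast]
  have hrl : ∀ i : Nat, ((List.range 300).map (fun k => pvPowerLevel (Int.ofNat i + 1) (Int.ofNat k + 1) serial)).length = 300 := by
    intro i; rw [List.length_map, List.length_range]
  rw [pv_getFlat _ hrl 300 a b (by omega) (by omega)]
  rw [PySem.List.getD_map_range _ _ _ _ (by omega)]
  norm_num [Int.ofNat_eq_natCast]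

-- one entry of B's precomputed row-sum table
theorem pv_levelB (serial : Int) (x y : Int) (hx0 : 0 ≤ x) (hx : x < 300)
    (hy0 : 0 ≤ y) (hy : y < 298) :
    pvAGet (pvAGet (pvRowSum (pvGridB serial)) x #[]) y 0
    = pvPowerLevel (x + 1) (y + 1) serial + pvPowerLevel (x + 1) (y + 2) serial +
      pvPowerLevel (x + 1) (y + 3) serial := by
  unfold pvRowSum pvGridB
  rw [List.map_toArray, List.map_map]
  rw [pvAGet_toArray_map_pyRange _ _ _ _ hx0 hx]
  simp only [Function.comp]
  rw [show (300 - 2 : Int) = 298 by norm_num]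
  rw [pvAGet_toArray_map_pyRange _ _ _ _ hy0 hy]
  rw [pvAGet_toArray_map_pyRange _ _ _ _ hy0 (by omega)]
  rw [pvAGet_toArray_map_pyRange _ _ _ _ (by omega) (by omega)]
  rw [pvAGet_toArray_map_pyRange _ _ _ _ (by omega) (by omega)]
  ring_nf

-- the two window levels agree on every scanned cell
theorem pv_level_eq (serial : Int) (x y : Int) (hx0 : 0 ≤ x) (hx : x < 297)
    (hy0 : 0 ≤ y) (hy : y < 297) :
    pvSquareLevel (pvGridA serial) x y
    = pvAGet (pvAGet (pvRowSum (pvGridB serial)) x #[]) y 0 +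
      pvAGet (pvAGet (pvRowSum (pvGridB serial)) (x + 1) #[]) y 0 +
      pvAGet (pvAGet (pvRowSum (pvGridB serial)) (x + 2) #[]) y 0 := by
  unfold pvSquareLevel
  rw [show (x * 300 + y + 1 : Int) = x * 300 + (y + 1) by ring,
      show ((x + 1) * 300 + y + 1 : Int) = (x + 1) * 300 + (y + 1) by ring,
      show ((x + 2) * 300 + y + 1 : Int) = (x + 2) * 300 + (y + 1) by ring,
      show (x * 300 + y + 2 : Int) = x * 300 + (y + 2) by ring,
      show ((x + 1) * 300 + y + 2 : Int) = (x + 1) * 300 + (y + 2) by ring,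
      show ((x + 2) * 300 + y + 2 : Int) = (x + 2) * 300 + (y + 2) by ring]
  rw [pv_gridA_get serial x y hx0 (by omega) hy0 (by omega),
      pv_gridA_get serial (x + 1) y (by omega) (by omega) hy0 (by omega),
      pv_gridA_get serial (x + 2) y (by omega) (by omega) hy0 (by omega),
      pv_gridA_get serial x (y + 1) hx0 (by omega) (by omega) (by omega),
      pv_gridA_get serial (x + 1) (y + 1) (by omega) (by omega) (by omega) (by omega),
      pv_gridA_get serial (x + 2) (y + 1) (by omega) (by omega) (by omega) (by omega),
      pv_gridA_get serial x (y + 2) hx0 (by omega) (by omega) (by omega),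
      pv_gridA_get serial (x + 1) (y + 2) (by omega) (by omega) (by omega) (by omega),
      pv_gridA_get serial (x + 2) (y + 2) (by omega) (by omega) (by omega) (by omega)]
  rw [pv_levelB serial x y hx0 (by omega) hy0 (by omega),
      pv_levelB serial (x + 1) y (by omega) (by omega) hy0 (by omega),
      pv_levelB serial (x + 2) y (by omega) (by omega) hy0 (by omega)]
  ring_nf

-- the two scan loops compute the same final state
theorem pv_scan_eq (serial : Int) :
    (PySem.List.pyRange 0 (300 - 3) 1).foldl (fun st x =>
      (PySem.List.pyRange 0 (300 - 3) 1).foldl (fun st y =>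
        let level := pvSquareLevel (pvGridA serial) x y
        if st.1 < level then (level, some (x + 1, y + 1)) else st) st)
      ((-999 : Int), (none : Option (Int × Int)))
    = (PySem.List.pyRange 0 (300 - 3) 1).foldl (fun st x =>
      (PySem.List.pyRange 0 (300 - 3) 1).foldl (fun st y =>
        let level := pvAGet (pvAGet (pvRowSum (pvGridB serial)) x #[]) y 0 +
                     pvAGet (pvAGet (pvRowSum (pvGridB serial)) (x + 1) #[]) y 0 +
                     pvAGet (pvAGet (pvRowSum (pvGridB serial)) (x + 2) #[]) y 0
        if st.1 < level then (level, some (x + 1, y + 1)) else st) st)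
      ((-999 : Int), (none : Option (Int × Int))) := by
  apply PySem.List.foldl_congr_mem
  intro st x hxmem
  have hx := (PySem.List.mem_pyRange_one).mp hxmem
  apply PySem.List.foldl_congr_mem
  intro st' y hymem
  have hy := (PySem.List.mem_pyRange_one).mp hymem
  have h := pv_level_eq serial x y (by omega) (by omega) (by omega) (by omega)
  simp only [h]

-- ===== VERDICT (by name: the statement is the Claim_ definition above) =====
theorem solve_spec : Claim_equal_solve := by
  intro input _
  unfold Spec_solve solve solve_alt
  simp only [pv_scan_eq input]
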